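-- pv_equiv track=rewrite | github.com/status-im/ift-docs | prompts/conversion/templates/transform.py | _expected_rule_ids_with_dups
-- ===== SOURCE A (Python) =====
-- from typing import Dict, List, Set, Tuple
--
-- def _expected_rule_ids_with_dups(rule_ids_exact: List[str]) -> List[str]:
--     counts: Dict[str, int] = {}
--     out: List[str] = []
--     for rid in rule_ids_exact:
--         c = counts.get(rid, 0)
--         if c == 0:
--             out.append(rid)
--         else:
--             out.append(f"{rid}-DUP-{c}")
--         counts[rid] = c + 1
--     return out
-- ===== SOURCE B (Python) =====
-- from typing import List
--
--
-- def _expected_rule_ids_with_dups(rule_ids_exact: List[str]) -> List[str]: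
--     # Group-and-scatter: preallocate the output, then for each distinct id
--     # (first-occurrence order) scan the input once and write that id's
--     # decorated occurrences into their slots out of order.
--     out: List[str] = [""] * len(rule_ids_exact)
--     for rid in dict.fromkeys(rule_ids_exact):
--         k = 0
--         for i, x in enumerate(rule_ids_exact):
--             if x == rid:
--                 out[i] = x if k == 0 else f"{x}-DUP-{k}"
--                 k += 1
--     return out
-- ===== Notes on version B (the rewrite author's own statement) =====
-- stated objective: alternative
-- what changed: Replaces A's single left-to-right pass with a running-counts dict by a group-and-scatter scheme: preallocate the output, loop over the distinct ids (dict.fromkeys order), and for each id rescan the input writing that id's decorated occurrences into their slots with a per-id counter.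
import Mathlib
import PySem

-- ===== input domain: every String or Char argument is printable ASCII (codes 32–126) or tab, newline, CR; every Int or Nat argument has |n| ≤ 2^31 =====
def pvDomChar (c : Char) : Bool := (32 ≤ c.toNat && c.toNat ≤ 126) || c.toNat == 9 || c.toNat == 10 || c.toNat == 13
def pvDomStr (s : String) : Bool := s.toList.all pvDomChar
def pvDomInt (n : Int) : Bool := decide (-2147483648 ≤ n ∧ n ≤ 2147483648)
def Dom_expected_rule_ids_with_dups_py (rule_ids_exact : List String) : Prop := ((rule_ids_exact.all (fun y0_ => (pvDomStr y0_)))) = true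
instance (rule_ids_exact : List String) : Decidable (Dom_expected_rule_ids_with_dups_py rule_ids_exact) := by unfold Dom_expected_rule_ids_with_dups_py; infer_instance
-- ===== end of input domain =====

-- B replaces A's single pass with a dict of running counts by a group-and-scatter scheme:
-- preallocate the output, loop over the distinct ids, rescan the input per id and write
-- that id's decorated occurrences into their slots; same output, different algorithm.

-- ===== PORT A =====
-- counts: Dict[str,int]; out accumulated; for rid in rule_ids_exact: …
def expected_rule_ids_with_dups_py (rule_ids_exact : List String) : List String :=
  (rule_ids_exact.foldl
    (fun (st : PySem.Dict String Int × List String) rid =>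
      let c := st.1.getD rid 0
      let out := if c == 0 then st.2 ++ [rid] else st.2 ++ [rid ++ "-DUP-" ++ PySem.Int.toStr c]
      (st.1.insert rid (c + 1), out))
    (PySem.Dict.empty, [])).2

-- ===== PORT B =====
-- out = [""] * len(xs); for rid in dict.fromkeys(xs): k = 0; for i, x in enumerate(xs):
--   if x == rid: out[i] = x if k == 0 else f"{x}-DUP-{k}"; k += 1
-- (out[i] = v ported as PySem.List.pySetD: i comes from enumerate, so it is in range — exact here)
def expected_rule_ids_with_dups_py_alt (rule_ids_exact : List String) : List String :=
  (PySem.List.dedup rule_ids_exact).foldl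
    (fun out rid =>
      ((PySem.List.enumerate rule_ids_exact 0).foldl
        (fun (st : List String × Int) p =>
          if p.2 == rid then
            (PySem.List.pySetD st.1 p.1
               (if st.2 == 0 then p.2 else p.2 ++ "-DUP-" ++ PySem.Int.toStr st.2),
             st.2 + 1)
          else st)
        (out, 0)).1)
    (List.replicate rule_ids_exact.length "")

-- ===== PRECONDITION & SPEC =====
def Spec_expected_rule_ids_with_dups_py (rule_ids_exact : List String) (out : List String) : Prop := out = expected_rule_ids_with_dups_py_alt rule_ids_exact
instance (rule_ids_exact : List String) (out : List String) : Decidable (Spec_expected_rule_ids_with_dups_py rule_ids_exact out) := by unfold Spec_expected_rule_ids_with_dups_py; infer_instance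

-- ===== CLAIM (what is proved, stated in full; the proofs are below) =====
def Claim_equal_expected_rule_ids_with_dups_py : Prop := ∀ (rule_ids_exact : List String), Dom_expected_rule_ids_with_dups_py rule_ids_exact → Spec_expected_rule_ids_with_dups_py rule_ids_exact (expected_rule_ids_with_dups_py rule_ids_exact)

-- ===== LEMMAS AND PROOFS =====

-- decorate an id by its (integer) prior-occurrence count
def pvDec (x : String) (c : Int) : String :=
  if c == 0 then x else x ++ "-DUP-" ++ PySem.Int.toStr c

-- Reference function: output for suffix `rest` given the already-seen prefix `pre`.
def pvRef (pre rest : List String) : List String :=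
  match rest with
  | [] => []
  | rid :: rest' => pvDec rid (pre.count rid : Int) :: pvRef (pre ++ [rid]) rest'

lemma pvA_eq_ref (rest : List String) : ∀ (pre acc : List String) (d : PySem.Dict String Int),
    (∀ r, d.getD r 0 = (pre.count r : Int)) →
    (rest.foldl
      (fun (st : PySem.Dict String Int × List String) rid =>
        let c := st.1.getD rid 0
        let out := if c == 0 then st.2 ++ [rid] else st.2 ++ [rid ++ "-DUP-" ++ PySem.Int.toStr c]
        (st.1.insert rid (c + 1), out))
      (d, acc)).2 = acc ++ pvRef pre rest := by
  induction rest with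
  | nil => intro pre acc d h; simp [pvRef]
  | cons rid rest' ih =>
    intro pre acc d h
    simp only [List.foldl_cons, pvRef]
    rw [ih (pre ++ [rid])]
    · rw [h rid]
      by_cases hc : (pre.count rid : Int) == 0 <;> simp [pvDec, hc]
    · intro r
      rw [PySem.Dict.getD_insert, h rid]
      by_cases hr : r = rid
      · subst hr; simp
      · simp [Ne.symm hr, h r, List.count_append, hr]

lemma pvRef_length (rest : List String) : ∀ pre, (pvRef pre rest).length = rest.length := by
  induction rest with
  | nil => intro pre; simp [pvRef]
  | cons rid rest' ih => intro pre; simp [pvRef, ih]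

lemma pvRef_getElem? (rest : List String) : ∀ (pre : List String) (j : Nat) (h : j < rest.length),
    (pvRef pre rest)[j]? = some (pvDec (rest[j]) (((pre ++ rest.take j).count (rest[j]) : Nat) : Int)) := by
  induction rest with
  | nil => intro pre j h; simp at h
  | cons rid rest' ih =>
    intro pre j h
    cases j with
    | zero => simp [pvRef]
    | succ j' =>
      have hj : j' < rest'.length := by simpa using h
      simp only [pvRef, List.getElem?_cons_succ, List.getElem_cons_succ, List.take_succ_cons]
      rw [ih (pre ++ [rid]) j' hj]
      simp [List.append_assoc]

-- step of B's inner loop, for a fixed rid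
def pvStep (rid : String) (st : List String × Int) (p : Int × String) : List String × Int :=
  if p.2 == rid then
    (PySem.List.pySetD st.1 p.1
       (if st.2 == 0 then p.2 else p.2 ++ "-DUP-" ++ PySem.Int.toStr st.2),
     st.2 + 1)
  else st

lemma pvStep_pos (rid : String) (st : List String × Int) (p : Int × String)
    (h : p.2 = rid) (h0 : 0 ≤ p.1) :
    pvStep rid st p = (st.1.set p.1.toNat (pvDec p.2 st.2), st.2 + 1) := by
  unfold pvStep
  rw [if_pos (by simp [h] : (p.2 == rid) = true)]
  rw [PySem.List.pySetD_of_nonneg _ _ h0]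
  rfl

lemma pvStep_neg (rid : String) (st : List String × Int) (p : Int × String)
    (h : ¬ p.2 = rid) : pvStep rid st p = st := by
  unfold pvStep
  rw [if_neg (by simp [h])]

lemma pvStep_length (rid : String) (l : List (Int × String)) :
    ∀ (st : List String × Int), (∀ p ∈ l, 0 ≤ p.1) →
    ((l.foldl (pvStep rid) st).1).length = st.1.length := by
  induction l with
  | nil => intro st _; rfl
  | cons p l' ih =>
    intro st hl
    rw [List.foldl_cons]
    by_cases hp : p.2 = rid
    · rw [pvStep_pos rid st p hp (hl p List.mem_cons_self)]
      rw [ih _ (fun q hq => hl q (List.mem_cons_of_mem _ hq))]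
      simp
    · rw [pvStep_neg rid st p hp]
      exact ih st (fun q hq => hl q (List.mem_cons_of_mem _ hq))

-- Inner loop, pointwise: processing the suffix `rest` (offset = pre.length, counter = count in pre)
-- writes exactly rid's occurrences in `rest`, each decorated with its running count.
lemma pvInner (rid : String) (rest : List String) : ∀ (pre out : List String) (j : Nat),
    out.length = pre.length + rest.length →
    (((PySem.List.enumerate rest (pre.length : Int)).foldl (pvStep rid)
        (out, (pre.count rid : Int))).1)[j]? =
      if pre.length ≤ j ∧ rest[j - pre.length]? = some rid then
        some (pvDec rid (((pre ++ rest.take (j - pre.length)).count rid : Nat) : Int))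
      else out[j]? := by
  induction rest with
  | nil =>
    intro pre out j _
    simp [PySem.List.enumerate_nil]
  | cons x rest' ih =>
    intro pre out j hlen
    rw [PySem.List.enumerate_cons, List.foldl_cons]
    have hofs : ((pre.length : Int) + 1) = (((pre ++ [x]).length : Nat) : Int) := by simp
    have hjlt : pre.length < out.length := by simp at hlen; omega
    by_cases hx : x = rid
    · rw [hx]
      rw [pvStep_pos rid _ _ rfl (Int.natCast_nonneg _)]
      have hcnt : ((pre.count rid : Int) + 1) = (((pre ++ [rid]).count rid : Nat) : Int) := by
        simp [List.count_append]
      simp only [Int.toNat_natCast]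
      have hofs' : ((pre.length : Int) + 1) = (((pre ++ [rid]).length : Nat) : Int) := by simp
      rw [hcnt, hofs']
      rw [ih (pre ++ [rid]) _ j
        (by simp only [List.length_set, List.length_append, List.length_singleton]
            simp only [List.length_cons] at hlen; omega)]
      simp only [List.length_append, List.length_singleton]
      by_cases h1 : pre.length + 1 ≤ j
      · have h3 : j - pre.length = (j - (pre.length + 1)) + 1 := by omega
        rw [h3]
        simp only [List.getElem?_cons_succ, List.take_succ_cons]
        have hl2 : pre ++ rid :: rest'.take (j - (pre.length + 1))
            = (pre ++ [rid]) ++ rest'.take (j - (pre.length + 1)) := by simp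
        rw [hl2]
        by_cases h5 : rest'[j - (pre.length + 1)]? = some rid
        · rw [if_pos ⟨h1, h5⟩, if_pos ⟨by omega, h5⟩]
        · rw [if_neg (by rintro ⟨-, hc⟩; exact h5 hc),
              if_neg (by rintro ⟨-, hc⟩; exact h5 hc)]
          exact List.getElem?_set_ne (by omega)
      · rw [if_neg (by rintro ⟨hc, -⟩; omega)]
        by_cases h2 : j = pre.length
        · subst h2
          rw [Nat.sub_self]
          simp only [List.getElem?_cons_zero, List.take_zero, List.append_nil]
          rw [if_pos ⟨le_refl _, by simp⟩]
          rw [List.getElem?_set_self hjlt]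
        · rw [if_neg (by rintro ⟨hc, -⟩; omega)]
          exact List.getElem?_set_ne (by omega)
    · rw [pvStep_neg rid _ _ hx]
      have hcnt : ((pre.count rid : Nat) : Int) = (((pre ++ [x]).count rid : Nat) : Int) := by
        simp [List.count_append, hx]
      rw [hcnt, hofs]
      rw [ih (pre ++ [x]) out j
        (by simp only [List.length_append, List.length_singleton]
            simp only [List.length_cons] at hlen; omega)]
      simp only [List.length_append, List.length_singleton]
      by_cases h1 : pre.length + 1 ≤ j
      · have h3 : j - pre.length = (j - (pre.length + 1)) + 1 := by omega
        rw [h3]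
        simp only [List.getElem?_cons_succ, List.take_succ_cons]
        have hl2 : pre ++ x :: rest'.take (j - (pre.length + 1))
            = (pre ++ [x]) ++ rest'.take (j - (pre.length + 1)) := by simp
        rw [hl2]
        by_cases h5 : rest'[j - (pre.length + 1)]? = some rid
        · rw [if_pos ⟨h1, h5⟩, if_pos ⟨by omega, h5⟩]
        · rw [if_neg (by rintro ⟨-, hc⟩; exact h5 hc),
              if_neg (by rintro ⟨-, hc⟩; exact h5 hc)]
      · rw [if_neg (by rintro ⟨hc, -⟩; omega)]
        by_cases h2 : j = pre.length
        · subst h2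
          rw [Nat.sub_self]
          rw [if_neg (by rintro ⟨-, hc⟩; simp at hc; exact hx hc)]
        · rw [if_neg (by rintro ⟨hc, -⟩; omega)]

-- target value of the output at index j
def pvTarget (xs : List String) (j : Nat) : Option String :=
  xs[j]?.map (fun x => pvDec x (((xs.take j).count x : Nat) : Int))

-- Outer loop, pointwise: after processing the ids in S, every slot whose id is in S holds its target.
lemma pvOuter (xs : List String) (S : List String) : ∀ (out : List String) (j : Nat),
    out.length = xs.length →
    ((S.foldl
        (fun out rid => (((PySem.List.enumerate xs 0).foldl (pvStep rid) (out, 0)).1))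
        out)[j]?) =
      if ∃ r ∈ S, xs[j]? = some r then pvTarget xs j else out[j]? := by
  induction S with
  | nil => intro out j _; simp
  | cons rid S' ih =>
    intro out j hlen
    simp only [List.foldl_cons]
    have hinner := pvInner rid xs [] out j (by simpa using hlen)
    simp only [List.length_nil, List.count_nil, Nat.zero_le, true_and, Nat.sub_zero,
      Nat.cast_zero, List.nil_append] at hinner
    have hlen1 : (((PySem.List.enumerate xs 0).foldl (pvStep rid) (out, 0)).1).length = xs.length := by
      rw [pvStep_length rid _ _ ?_]
      · exact hlen
      · intro p hp
        rcases (PySem.List.mem_enumerate_iff _ _ _).1 hp with ⟨k, hk, rfl⟩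
        simp
    rw [ih _ j hlen1]
    by_cases hS' : ∃ r ∈ S', xs[j]? = some r
    · rw [if_pos hS', if_pos ⟨_, List.mem_cons_of_mem _ hS'.choose_spec.1, hS'.choose_spec.2⟩]
    · rw [if_neg hS']
      rw [hinner]
      by_cases hr : xs[j]? = some rid
      · rw [if_pos hr, if_pos ⟨rid, List.mem_cons_self, hr⟩]
        unfold pvTarget
        rw [hr]
        rfl
      · rw [if_neg hr, if_neg (by rintro ⟨r, hrS, hxr⟩
                                  rcases List.mem_cons.1 hrS with h | h
                                  · exact hr (h ▸ hxr)
                                  · exact hS' ⟨r, h, hxr⟩)]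

lemma pvB_eq_ref (xs : List String) :
    expected_rule_ids_with_dups_py_alt xs = pvRef [] xs := by
  have hfold : expected_rule_ids_with_dups_py_alt xs =
      (PySem.List.dedup xs).foldl
        (fun out rid => (((PySem.List.enumerate xs 0).foldl (pvStep rid) (out, 0)).1))
        (List.replicate xs.length "") := rfl
  apply List.ext_getElem?
  intro j
  rw [hfold, pvOuter xs _ _ j (by simp)]
  by_cases hj : j < xs.length
  · have hx : xs[j]? = some (xs[j]) := List.getElem?_eq_getElem hj
    rw [if_pos ⟨xs[j], by rw [PySem.List.mem_dedup]; exact List.getElem_mem hj, hx⟩]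
    unfold pvTarget
    rw [hx, pvRef_getElem? xs [] j hj]
    simp
  · rw [if_neg (by rintro ⟨r, -, hxr⟩
                   rw [List.getElem?_eq_none (by omega)] at hxr
                   simp at hxr)]
    rw [List.getElem?_eq_none (by simp; omega),
        List.getElem?_eq_none (by rw [pvRef_length]; omega)]

-- ===== VERDICT (by name: the statement is the Claim_ definition above) =====
theorem expected_rule_ids_with_dups_py_spec : Claim_equal_expected_rule_ids_with_dups_py := by
  intro xs _
  unfold Spec_expected_rule_ids_with_dups_py expected_rule_ids_with_dups_py
  rw [pvA_eq_ref xs [] [] PySem.Dict.empty (by intro r; simp)]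
  rw [pvB_eq_ref xs]
  simp
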